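-- pv_equiv track=rewrite | github.com/themedworld/agricalcule | main.py | score_rouille_jaune
-- ===== SOURCE A (Python) =====
-- def clamp(score):
--     return max(0, min(100, score))
--
-- def score_rouille_jaune(hours):
--     score = 0
--     consecutive = 0
--
--     for h in hours[:24]:
--         if 7 <= h["temp"] <= 18 and h["humidity"] >= 87:
--             consecutive += 1
--             score += 5
--             if h["is_wet"]:
--                 score += 4
--         else:
--             consecutive = 0
--
--         if consecutive >= 5:
--             score += 20
--
--     return clamp(score)
-- ===== SOURCE B (Python) =====
-- def score_rouille_jaune(hours):
--     base = 0
--     runs = []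
--     cur = 0
--     for h in hours[:24]:
--         if 7 <= h["temp"] <= 18 and h["humidity"] >= 87:
--             base += 9 if h["is_wet"] else 5
--             cur += 1
--         else:
--             if cur:
--                 runs.append(cur)
--             cur = 0
--     if cur:
--         runs.append(cur)
--     bonus = sum(20 * max(0, L - 4) for L in runs)
--     return max(0, min(100, base + bonus))
-- ===== Notes on version B (the rewrite author's own statement) =====
-- stated objective: alternative
-- what changed: Replaces the inline per-hour consecutive>=5 bonus counter with a runs table collected in one pass and a closed-form run bonus sum(20*max(0,L-4)) applied after the loop.
import Mathlib
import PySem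

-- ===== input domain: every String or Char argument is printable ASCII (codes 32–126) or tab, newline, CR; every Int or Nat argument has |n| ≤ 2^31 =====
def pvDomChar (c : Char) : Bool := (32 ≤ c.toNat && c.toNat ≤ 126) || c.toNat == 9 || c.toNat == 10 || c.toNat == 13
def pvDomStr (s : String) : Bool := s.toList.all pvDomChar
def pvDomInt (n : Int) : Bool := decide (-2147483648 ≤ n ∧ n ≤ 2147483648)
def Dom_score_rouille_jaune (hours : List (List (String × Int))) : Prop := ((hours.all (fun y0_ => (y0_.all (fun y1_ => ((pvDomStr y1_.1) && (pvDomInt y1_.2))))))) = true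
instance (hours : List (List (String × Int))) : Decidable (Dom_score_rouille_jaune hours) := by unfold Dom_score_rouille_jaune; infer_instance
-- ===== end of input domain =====

-- B collects maximal favorable-run lengths in one pass and applies a closed-form run bonus
-- sum(20*max(0,L-4)) after the loop, instead of A's inline per-hour consecutive>=5 counter (objective: alternative).


-- ===== PORT A =====
-- h["k"]: first-match association-list lookup (Python dict under the type convention);
-- missing keys (Python KeyError) are excluded by Pre_ below, the port then reads the default 0.
def pvGetD (h : List (String × Int)) (k : String) : Int := (h.lookup k).getD 0

-- favorable-hour test, exactly A's condition `7 <= h["temp"] <= 18 and h["humidity"] >= 87`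
def pvFav (h : List (String × Int)) : Bool :=
  7 ≤ pvGetD h "temp" && pvGetD h "temp" ≤ 18 && 87 ≤ pvGetD h "humidity"

-- one iteration of A's loop body on the state (score, consecutive)
def pvStepA (st : Int × Int) (h : List (String × Int)) : Int × Int :=
  let st :=
    if pvFav h then
      (st.1 + 5 + (if pvGetD h "is_wet" ≠ 0 then 4 else 0), st.2 + 1)
    else
      (st.1, 0)
  if st.2 ≥ 5 then (st.1 + 20, st.2) else st

-- hours[:24] on a list = take 24 (exact for a nonnegative stop)
def score_rouille_jaune (hours : List (List (String × Int))) : Int :=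
  let st := (hours.take 24).foldl pvStepA (0, 0)
  max 0 (min 100 st.1)

-- ===== PORT B =====
-- one iteration of B's loop body on the state (base, runs, cur)
def pvStepB (st : Int × List Int × Int) (h : List (String × Int)) : Int × List Int × Int :=
  if pvFav h then
    (st.1 + (if pvGetD h "is_wet" ≠ 0 then 9 else 5), st.2.1, st.2.2 + 1)
  else
    (st.1, (if st.2.2 ≠ 0 then st.2.1 ++ [st.2.2] else st.2.1), 0)

def score_rouille_jaune_alt (hours : List (List (String × Int))) : Int :=
  let st := (hours.take 24).foldl pvStepB (0, [], 0)
  let runs := if st.2.2 ≠ 0 then st.2.1 ++ [st.2.2] else st.2.1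
  let bonus := (runs.map (fun L => 20 * max 0 (L - 4))).sum
  max 0 (min 100 (st.1 + bonus))

-- ===== PRECONDITION & SPEC =====
-- Pre_ excludes exactly the inputs on which A raises KeyError: an examined hour missing
-- "temp", or missing "humidity" when temp is in range (the `and` short-circuits), or a
-- favorable hour missing "is_wet" (B raises there too).
def Pre_score_rouille_jaune (hours : List (List (String × Int))) : Prop :=
  ∀ h ∈ hours.take 24, (h.lookup "temp").isSome ∧
    (7 ≤ pvGetD h "temp" ∧ pvGetD h "temp" ≤ 18 → (h.lookup "humidity").isSome) ∧
    (pvFav h = true → (h.lookup "is_wet").isSome)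
instance (hours : List (List (String × Int))) : Decidable (Pre_score_rouille_jaune hours) := by unfold Pre_score_rouille_jaune; infer_instance
def pvWitness_score_rouille_jaune : (List (List (String × Int))) :=
  [[("temp", 10), ("humidity", 90), ("is_wet", 1)], [("temp", 3), ("humidity", 50)]]
def Spec_score_rouille_jaune (hours : List (List (String × Int))) (out : Int) : Prop := out = score_rouille_jaune_alt hours
instance (hours : List (List (String × Int))) (out : Int) : Decidable (Spec_score_rouille_jaune hours out) := by unfold Spec_score_rouille_jaune; infer_instance

-- ===== CLAIM (what is proved, stated in full; the proofs are below) =====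
def Claim_equal_score_rouille_jaune : Prop := ∀ (hours : List (List (String × Int))), Dom_score_rouille_jaune hours → Pre_score_rouille_jaune hours → Spec_score_rouille_jaune hours (score_rouille_jaune hours)

-- ===== LEMMAS AND PROOFS =====

-- run bonus as a function of a run length
def pvBonus (L : Int) : Int := 20 * max 0 (L - 4)

-- one step of A equals one step of B under the invariant
theorem pv_step (h : List (String × Int)) (b : Int) (r : List Int) (c : Int) (hc : 0 ≤ c) :
    pvStepA (b + (r.map pvBonus).sum + pvBonus c, c) h
    = ((pvStepB (b, r, c) h).1 + (((pvStepB (b, r, c) h).2.1).map pvBonus).sum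
        + pvBonus (pvStepB (b, r, c) h).2.2, (pvStepB (b, r, c) h).2.2) := by
  unfold pvStepA pvStepB
  by_cases hf : pvFav h <;>
    simp only [hf, if_true, if_false, Bool.false_eq_true] <;>
    split_ifs <;>
    simp only [pvBonus, List.map_append, List.sum_append, List.map_cons, List.sum_cons,
      List.map_nil, List.sum_nil, Prod.mk.injEq, and_true] <;>
    omega

-- B's cur stays nonnegative
theorem pv_step_nonneg (h : List (String × Int)) (b : Int) (r : List Int) (c : Int)
    (hc : 0 ≤ c) : 0 ≤ (pvStepB (b, r, c) h).2.2 := by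
  unfold pvStepB; split_ifs <;> simp <;> omega

-- Loop invariant: A's score = B's base + bonuses of closed runs + bonus of the open run,
-- and A's consecutive counter = B's cur.
theorem pv_loop (l : List (List (String × Int))) :
    ∀ (b : Int) (r : List Int) (c : Int), 0 ≤ c →
    l.foldl pvStepA (b + (r.map pvBonus).sum + pvBonus c, c)
    = ((l.foldl pvStepB (b, r, c)).1 + (((l.foldl pvStepB (b, r, c)).2.1).map pvBonus).sum
        + pvBonus (l.foldl pvStepB (b, r, c)).2.2, (l.foldl pvStepB (b, r, c)).2.2) := by
  induction l with
  | nil => intro b r c hc; simp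
  | cons h t ih =>
    intro b r c hc
    rw [List.foldl_cons, List.foldl_cons, pv_step h b r c hc]
    have hn := pv_step_nonneg h b r c hc
    rcases hq : pvStepB (b, r, c) h with ⟨b', r', c'⟩
    rw [hq] at hn
    exact ih b' r' c' hn

-- ===== VERDICT (by name: the statement is the Claim_ definition above) =====
theorem score_rouille_jaune_spec : Claim_equal_score_rouille_jaune := by
  intro hours _ _
  unfold Spec_score_rouille_jaune score_rouille_jaune score_rouille_jaune_alt
  have h := pv_loop (hours.take 24) 0 [] 0 (by omega)
  rw [show (0 : Int) + (([] : List Int).map pvBonus).sum + pvBonus 0 = 0 by simp [pvBonus]] at h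
  simp only []
  rw [h]
  rcases (hours.take 24).foldl pvStepB ((0 : Int), ([] : List Int), (0 : Int)) with ⟨b, r, c⟩
  have hB : pvBonus = fun L => 20 * max 0 (L - 4) := rfl
  simp only [hB]
  by_cases h0 : c ≠ 0
  · rw [if_pos h0]
    simp only [List.map_append, List.sum_append, List.map_cons, List.sum_cons,
      List.map_nil, List.sum_nil]
    omega
  · rw [if_neg h0]
    omega
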